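-- pv_equiv track=rewrite | github.com/Easy-BS/v0.1.1 | easybs/preprocess_idf_for_calibration.py | _month_set_to_runperiods
-- ===== SOURCE A (Python) =====
-- from typing import Dict, List, Tuple, Optional
--
-- def _month_set_to_runperiods(months: List[int]) -> List[Tuple[int, int, int, int, str]]:
--     """
--     Convert a set of months to up to two RunPeriods to avoid discontinuous simulation.
--     For your current case {1,2,3,4,10,11,12} -> two periods:
--       01/01-04/30 and 10/01-12/31
--
--     Returns list of tuples: (begin_month, begin_day, end_month, end_day, name)
--     """
--     mset = sorted(set(months))
--     if not mset:
--         raise ValueError("No months provided.")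
--
--     # Simple heuristic:
--     # - If months are a single contiguous block -> one RunPeriod covering min..max.
--     # - If two blocks separated by a gap -> two RunPeriods for each block.
--     # We do not support >2 blocks in quick mode (can be added later).
--     blocks = []
--     cur = [mset[0]]
--     for m in mset[1:]:
--         if m == cur[-1] + 1:
--             cur.append(m)
--         else:
--             blocks.append(cur)
--             cur = [m]
--     blocks.append(cur)
--
--     if len(blocks) > 2:
--         raise ValueError(
--             f"Quick mode supports at most 2 month blocks; got {len(blocks)} blocks: {blocks}. "
--             "Consider simulating the full year and ignoring unmeasured months."
--         )
--
--     def _end_day(mm: int) -> int: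
--         # Use common month end days; leap day irrelevant for month-level results.
--         return {1:31, 2:28, 3:31, 4:30, 5:31, 6:30, 7:31, 8:31, 9:30, 10:31, 11:30, 12:31}[mm]
--
--     runperiods = []
--     for i, b in enumerate(blocks, start=1):
--         bm = b[0]
--         em = b[-1]
--         runperiods.append((bm, 1, em, _end_day(em), f"Cali_RunPeriod_{i}"))
--     return runperiods
-- ===== SOURCE B (Python) =====
-- from typing import List, Tuple
--
-- _END_DAY = {1: 31, 2: 28, 3: 31, 4: 30, 5: 31, 6: 30, 7: 31, 8: 31, 9: 30, 10: 31, 11: 30, 12: 31}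
--
-- def _month_set_to_runperiods(months: List[int]) -> List[Tuple[int, int, int, int, str]]:
--     s = set(months)
--     if not s:
--         raise ValueError("No months provided.")
--     # boundary detection by membership: a month starts a block iff its predecessor
--     # is absent, ends one iff its successor is absent; pair the i-th start with the
--     # i-th end and rebuild each block as the integer range between them.
--     starts = sorted(m for m in s if m - 1 not in s)
--     ends = sorted(m for m in s if m + 1 not in s)
--     blocks = [list(range(a, b + 1)) for a, b in zip(starts, ends)]
--     if len(blocks) > 2:
--         raise ValueError(
--             f"Quick mode supports at most 2 month blocks; got {len(blocks)} blocks: {blocks}. "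
--             "Consider simulating the full year and ignoring unmeasured months."
--         )
--     return [(a, 1, b, _END_DAY[b], f"Cali_RunPeriod_{i}")
--             for i, (a, b) in enumerate(zip(starts, ends), start=1)]
-- ===== Notes on version B (the rewrite author's own statement) =====
-- stated objective: alternative
-- what changed: Replaces A's left-to-right adjacency scan with a blocks/cur accumulator by boundary detection over the set: block starts are months whose predecessor is absent, block ends months whose successor is absent, paired by sorted order, with blocks rebuilt as integer ranges.
import Mathlib
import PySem

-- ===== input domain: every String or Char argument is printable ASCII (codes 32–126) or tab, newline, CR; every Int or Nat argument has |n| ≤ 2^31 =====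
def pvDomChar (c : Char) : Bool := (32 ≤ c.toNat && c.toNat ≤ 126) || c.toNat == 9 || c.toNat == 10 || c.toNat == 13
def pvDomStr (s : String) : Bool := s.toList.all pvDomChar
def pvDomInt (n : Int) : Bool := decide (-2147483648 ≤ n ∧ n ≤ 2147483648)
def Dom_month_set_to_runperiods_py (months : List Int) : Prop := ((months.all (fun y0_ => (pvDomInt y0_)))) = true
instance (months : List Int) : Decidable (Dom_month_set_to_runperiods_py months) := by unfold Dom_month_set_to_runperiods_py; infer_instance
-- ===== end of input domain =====

-- B replaces A's left-to-right adjacency scan (blocks/cur accumulator) by boundary detection via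
-- set membership: block starts are the months whose predecessor is absent, block ends those whose
-- successor is absent, zipped in sorted order; blocks are rebuilt as integer ranges (objective:
-- alternative, not faster).

-- ===== PORT A =====

-- the literal dict in A's local _end_day helper
def pvEndDayDictA : PySem.Dict Int Int :=
  PySem.Dict.ofList [(1,31),(2,28),(3,31),(4,30),(5,31),(6,30),(7,31),(8,31),(9,30),(10,31),(11,30),(12,31)]

-- _end_day(mm): dict lookup; Python raises KeyError when mm is no key — those inputs are outside Pre_, junk 0 here
def pvEndDayA (mm : Int) : Int := (PySem.Dict.get? pvEndDayDictA mm).getD 0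

-- A's for-loop over mset[1:] carrying (blocks, cur); cur[-1] via pyGet? (cur is never empty, so getD 0 never fires)
def pvBlocksLoopA : List Int → List (List Int) → List Int → List (List Int) × List Int
  | [], blocks, cur => (blocks, cur)
  | m :: rest, blocks, cur =>
    if m = (PySem.List.pyGet? cur (-1)).getD 0 + 1 then
      pvBlocksLoopA rest blocks (cur ++ [m])
    else
      pvBlocksLoopA rest (blocks ++ [cur]) [m]

def month_set_to_runperiods_py (months : List Int) : List (Int × Int × Int × Int × String) :=
  let mset := PySem.List.sorted (PySem.Set.ofList months) (fun x => x) false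
  match mset with
  | [] => []  -- Python: raise ValueError("No months provided.") — outside Pre_
  | m0 :: rest =>
    let st := pvBlocksLoopA rest [] [m0]
    let blocks := st.1 ++ [st.2]
    if blocks.length > 2 then []  -- Python: raise ValueError(…) — outside Pre_
    else
      (PySem.List.enumerate blocks 1).foldl
        (fun acc p =>
          acc ++ [((PySem.List.pyGet? p.2 0).getD 0, 1, (PySem.List.pyGet? p.2 (-1)).getD 0,
                   pvEndDayA ((PySem.List.pyGet? p.2 (-1)).getD 0),
                   "Cali_RunPeriod_" ++ PySem.Int.toStr p.1)]) []

-- ===== PORT B =====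

-- Source B's module-level _END_DAY dict
def pvEndDayDictB : PySem.Dict Int Int :=
  PySem.Dict.ofList [(1,31),(2,28),(3,31),(4,30),(5,31),(6,30),(7,31),(8,31),(9,30),(10,31),(11,30),(12,31)]

def month_set_to_runperiods_py_alt (months : List Int) : List (Int × Int × Int × Int × String) :=
  let s := PySem.Set.ofList months
  if s.isEmpty then []  -- Python: raise ValueError("No months provided.") — outside Pre_
  else
    -- sorted(m for m in s if m - 1 not in s) / sorted(m for m in s if m + 1 not in s):
    -- sorted without key over (a filtered) set — order-independent, exact
    let starts := PySem.List.sorted (s.filter (fun m => !(PySem.Set.contains s (m - 1)))) (fun x => x) false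
    let ends := PySem.List.sorted (s.filter (fun m => !(PySem.Set.contains s (m + 1)))) (fun x => x) false
    let blocks := (starts.zip ends).map (fun p => PySem.List.pyRange p.1 (p.2 + 1) 1)
    if blocks.length > 2 then []  -- Python: raise ValueError(…) — outside Pre_
    else
      (PySem.List.enumerate (starts.zip ends) 1).map
        (fun p => (p.2.1, 1, p.2.2,
                   (PySem.Dict.get? pvEndDayDictB p.2.2).getD 0,
                   "Cali_RunPeriod_" ++ PySem.Int.toStr p.1))

-- ===== PRECONDITION & SPEC =====

-- Pre_ excludes exactly the inputs where A raises: the empty month set (ValueError), more than two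
-- contiguous blocks (ValueError; a block end is a month m whose successor m+1 is absent), and a
-- block end outside 1..12 (KeyError in _end_day). B raises the identical exceptions there.
def Pre_month_set_to_runperiods_py (months : List Int) : Prop :=
  months ≠ [] ∧
  ((PySem.Set.ofList months).countP (fun m => !(months.contains (m + 1)))) ≤ 2 ∧
  (∀ m ∈ months, (m + 1) ∉ months → 1 ≤ m ∧ m ≤ 12)
instance (months : List Int) : Decidable (Pre_month_set_to_runperiods_py months) := by
  unfold Pre_month_set_to_runperiods_py; infer_instance

def pvWitness_month_set_to_runperiods_py : List Int := [1, 2, 3, 4, 10, 11, 12]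

def Spec_month_set_to_runperiods_py (months : List Int) (out : List (Int × Int × Int × Int × String)) : Prop := out = month_set_to_runperiods_py_alt months
instance (months : List Int) (out : List (Int × Int × Int × Int × String)) : Decidable (Spec_month_set_to_runperiods_py months out) := by unfold Spec_month_set_to_runperiods_py; infer_instance

-- ===== CLAIM (what is proved, stated in full; the proofs are below) =====
def Claim_equal_month_set_to_runperiods_py : Prop := ∀ (months : List Int), Dom_month_set_to_runperiods_py months → Pre_month_set_to_runperiods_py months → Spec_month_set_to_runperiods_py months (month_set_to_runperiods_py months)

-- ===== LEMMAS AND PROOFS =====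

-- (head, last) of each maximal consecutive run of (a-run-in-progress [a..c]) followed by rest
def pvRunPairs : Int → Int → List Int → List (Int × Int)
  | a, c, [] => [(a, c)]
  | a, c, m :: rest => if m = c + 1 then pvRunPairs a m rest else (a, c) :: pvRunPairs m m rest

-- block starts after the head, scanning adjacency
def pvStartsTail : Int → List Int → List Int
  | _, [] => []
  | prev, n :: t => if n = prev + 1 then pvStartsTail n t else n :: pvStartsTail n t

-- block ends, scanning adjacency
def pvEndsAux : Int → List Int → List Int
  | c, [] => [c]
  | c, n :: t => if n = c + 1 then pvEndsAux n t else c :: pvEndsAux n t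

def pvKeyf (b : List Int) : Int × Int :=
  ((PySem.List.pyGet? b 0).getD 0, (PySem.List.pyGet? b (-1)).getD 0)

-- A's loop, projected to (head, last) of each block, is pvRunPairs
theorem pvLoopA_pairs : ∀ (rest : List Int) (blocks : List (List Int)) (cur : List Int) (a c : Int),
    cur.head? = some a → cur.getLast? = some c →
    ((pvBlocksLoopA rest blocks cur).1 ++ [(pvBlocksLoopA rest blocks cur).2]).map pvKeyf
      = blocks.map pvKeyf ++ pvRunPairs a c rest := by
  intro rest
  induction rest with
  | nil =>
      intro blocks cur a c hh hl
      simp [pvBlocksLoopA, pvRunPairs, pvKeyf, PySem.List.pyGet?_zero, PySem.List.pyGet?_neg_one,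
            ← List.head?_eq_getElem?, hh, hl]
  | cons m rest ih =>
      intro blocks cur a c hh hl
      have hget : (PySem.List.pyGet? cur (-1)).getD 0 = c := by
        rw [PySem.List.pyGet?_neg_one, hl]; rfl
      rw [pvBlocksLoopA]
      by_cases hm : m = c + 1
      · rw [if_pos (by rw [hget]; omega)]
        have hh' : (cur ++ [m]).head? = some a := by
          rw [List.head?_append, hh]; rfl
        rw [ih blocks (cur ++ [m]) a m hh' List.getLast?_concat, pvRunPairs, if_pos hm]
      · rw [if_neg (by rw [hget]; omega)]
        rw [ih (blocks ++ [cur]) [m] m m rfl rfl, pvRunPairs, if_neg hm]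
        simp [pvKeyf, PySem.List.pyGet?_zero, PySem.List.pyGet?_neg_one,
              ← List.head?_eq_getElem?, hh, hl]

-- filtering a strictly increasing list by "predecessor absent" is the adjacency scan
theorem pvStarts_scan : ∀ (l : List Int) (prev : Int), List.Pairwise (· < ·) (prev :: l) →
    l.filter (fun y => !(decide ((y - 1) ∈ prev :: l))) = pvStartsTail prev l := by
  intro l
  induction l with
  | nil => intro prev _; rfl
  | cons n t ih =>
      intro prev hp
      have hpn : prev < n := (List.pairwise_cons.1 hp).1 n (by simp)
      have hnt : ∀ y ∈ t, n < y := (List.pairwise_cons.1 (List.pairwise_cons.1 hp).2).1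
      rw [List.filter_cons]
      have hmem : ((n - 1) ∈ prev :: n :: t) ↔ n = prev + 1 := by
        simp only [List.mem_cons]
        constructor
        · rintro (h | h | h)
          · omega
          · omega
          · have := hnt _ h; omega
        · intro h; left; omega
      have htail : t.filter (fun y => !(decide ((y - 1) ∈ prev :: n :: t)))
          = t.filter (fun y => !(decide ((y - 1) ∈ n :: t))) := by
        apply List.filter_congr
        intro y hy
        have hny := hnt y hy
        have hiff : ((y - 1) ∈ prev :: n :: t) ↔ ((y - 1) ∈ n :: t) := by
          simp only [List.mem_cons]
          constructor
          · rintro (h | h)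
            · omega
            · exact h
          · intro h; right; exact h
        simp [hiff]
      rw [htail, ih n (List.pairwise_cons.1 hp).2]
      by_cases h : n = prev + 1
      · simp [pvStartsTail, h]
      · simp [pvStartsTail, hmem, h]

-- filtering a strictly increasing list by "successor absent" is the adjacency scan
theorem pvEnds_scan : ∀ (l : List Int) (c : Int), List.Pairwise (· < ·) (c :: l) →
    (c :: l).filter (fun y => !(decide ((y + 1) ∈ c :: l))) = pvEndsAux c l := by
  intro l
  induction l with
  | nil =>
      intro c _
      simp [pvEndsAux]
  | cons n t ih =>
      intro c hp
      have hcn : c < n := (List.pairwise_cons.1 hp).1 n (by simp)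
      have hnt : ∀ y ∈ t, n < y := (List.pairwise_cons.1 (List.pairwise_cons.1 hp).2).1
      rw [List.filter_cons]
      have hmem : ((c + 1) ∈ c :: n :: t) ↔ n = c + 1 := by
        simp only [List.mem_cons]
        constructor
        · rintro (h | h | h)
          · omega
          · omega
          · have := hnt _ h; omega
        · intro h; right; left; omega
      have htail : (n :: t).filter (fun y => !(decide ((y + 1) ∈ c :: n :: t)))
          = (n :: t).filter (fun y => !(decide ((y + 1) ∈ n :: t))) := by
        apply List.filter_congr
        intro y hy
        have hny : n ≤ y := by
          rcases List.mem_cons.1 hy with h | h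
          · omega
          · have := hnt _ h; omega
        have hiff : ((y + 1) ∈ c :: n :: t) ↔ ((y + 1) ∈ n :: t) := by
          simp only [List.mem_cons]
          constructor
          · rintro (h | h)
            · omega
            · exact h
          · intro h; right; exact h
        simp [hiff]
      rw [htail, ih n (List.pairwise_cons.1 hp).2]
      by_cases h : n = c + 1
      · simp [pvEndsAux, h]
      · simp [pvEndsAux, hmem, h]

-- zipping the boundary lists reconstructs the run pairs
theorem pvZip_runPairs : ∀ (rest : List Int) (a c : Int),
    (a :: pvStartsTail c rest).zip (pvEndsAux c rest) = pvRunPairs a c rest := by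
  intro rest
  induction rest with
  | nil => intro a c; rfl
  | cons n t ih =>
      intro a c
      by_cases h : n = c + 1
      · simp only [pvStartsTail, pvEndsAux, pvRunPairs, if_pos h]
        exact ih a n
      · simp only [pvStartsTail, pvEndsAux, pvRunPairs, if_neg h]
        rw [List.zip_cons_cons, ← ih n n]

-- enumerate of a mapped list
theorem pvEnumerateMap {α β : Type} (f : α → β) : ∀ (xs : List α) (s : Int),
    PySem.List.enumerate (xs.map f) s = (PySem.List.enumerate xs s).map (fun p => (p.1, f p.2)) := by
  intro xs
  induction xs with
  | nil => intro s; rfl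
  | cons x xs ih =>
      intro s
      rw [List.map_cons, PySem.List.enumerate_cons, PySem.List.enumerate_cons, ih, List.map_cons]

-- the two ports agree on EVERY input (the junk values on the raising paths coincide too)
theorem pvPorts_eq (months : List Int) :
    month_set_to_runperiods_py months = month_set_to_runperiods_py_alt months := by
  unfold month_set_to_runperiods_py month_set_to_runperiods_py_alt
  have hperm := PySem.List.sorted_perm (PySem.Set.ofList months) (fun x : Int => x) false
  have hpw := PySem.List.sorted_ofList_pairwise_lt (xs := months)
  cases hm : PySem.List.sorted (PySem.Set.ofList months) (fun x => x) false with
  | nil =>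
      have hnil : PySem.Set.ofList months = [] := by
        rw [hm] at hperm
        exact hperm.symm.eq_nil
      simp [hnil]
  | cons m0 rest =>
      rw [hm] at hperm hpw
      have hsne : (PySem.Set.ofList months).isEmpty = false := by
        cases hse : (PySem.Set.ofList months).isEmpty
        · rfl
        · rw [List.isEmpty_iff] at hse
          rw [hse] at hperm
          exact absurd hperm.eq_nil (by simp)
      simp only [hsne, Bool.false_eq_true, if_false]
      have hcontains : ∀ y : Int,
          PySem.Set.contains (PySem.Set.ofList months) y = decide (y ∈ m0 :: rest) := by
        intro y
        have h1 := PySem.Set.contains_iff (PySem.Set.ofList months) y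
        have h2 : y ∈ m0 :: rest ↔ y ∈ PySem.Set.ofList months := hperm.mem_iff
        rw [Bool.eq_iff_iff, h1, decide_eq_true_iff]
        exact h2.symm
      -- starts: sorted-of-filtered-set = adjacency scan of the sorted list
      have hfs : (m0 :: rest).filter (fun m => !(PySem.Set.contains (PySem.Set.ofList months) (m - 1)))
          = m0 :: pvStartsTail m0 rest := by
        have hcg : (m0 :: rest).filter (fun m => !(PySem.Set.contains (PySem.Set.ofList months) (m - 1)))
            = (m0 :: rest).filter (fun y => !(decide ((y - 1) ∈ m0 :: rest))) :=
          List.filter_congr (fun y _ => by rw [hcontains])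
        have hm0 : ¬ ((m0 - 1) ∈ m0 :: rest) := by
          intro h
          rcases List.mem_cons.1 h with h | h
          · omega
          · have := (List.pairwise_cons.1 hpw).1 _ h; omega
        rw [hcg, List.filter_cons]
        simp only [hm0, decide_false, Bool.not_false, if_true]
        rw [pvStarts_scan rest m0 hpw]
      have hfe : (m0 :: rest).filter (fun m => !(PySem.Set.contains (PySem.Set.ofList months) (m + 1)))
          = pvEndsAux m0 rest := by
        have hcg : (m0 :: rest).filter (fun m => !(PySem.Set.contains (PySem.Set.ofList months) (m + 1)))
            = (m0 :: rest).filter (fun y => !(decide ((y + 1) ∈ m0 :: rest))) :=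
          List.filter_congr (fun y _ => by rw [hcontains])
        rw [hcg, pvEnds_scan rest m0 hpw]
      have hstarts : PySem.List.sorted ((PySem.Set.ofList months).filter
            (fun m => !(PySem.Set.contains (PySem.Set.ofList months) (m - 1)))) (fun x => x) false
          = m0 :: pvStartsTail m0 rest := by
        have h1 : (m0 :: pvStartsTail m0 rest).Perm ((PySem.Set.ofList months).filter
            (fun m => !(PySem.Set.contains (PySem.Set.ofList months) (m - 1)))) := by
          rw [← hfs]; exact hperm.filter _
        have h2 : (m0 :: pvStartsTail m0 rest).Pairwise (fun a b : Int => a < b) := by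
          rw [← hfs]; exact hpw.filter _
        exact PySem.List.sorted_eq_of_perm_of_pairwise_lt _ _ _ h1 h2
      have hends : PySem.List.sorted ((PySem.Set.ofList months).filter
            (fun m => !(PySem.Set.contains (PySem.Set.ofList months) (m + 1)))) (fun x => x) false
          = pvEndsAux m0 rest := by
        have h1 : (pvEndsAux m0 rest).Perm ((PySem.Set.ofList months).filter
            (fun m => !(PySem.Set.contains (PySem.Set.ofList months) (m + 1)))) := by
          rw [← hfe]; exact hperm.filter _
        have h2 : (pvEndsAux m0 rest).Pairwise (fun a b : Int => a < b) := by
          rw [← hfe]; exact hpw.filter _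
        exact PySem.List.sorted_eq_of_perm_of_pairwise_lt _ _ _ h1 h2
      rw [hstarts, hends, pvZip_runPairs rest m0 m0]
      have hA := pvLoopA_pairs rest [] [m0] m0 m0 rfl rfl
      simp only [List.map_nil, List.nil_append] at hA
      have hlen : ((pvBlocksLoopA rest [] [m0]).1 ++ [(pvBlocksLoopA rest [] [m0]).2]).length
          = (pvRunPairs m0 m0 rest).length := by
        rw [← hA, List.length_map]
      rw [List.length_map, ← hlen]
      split
      · rfl
      · rw [PySem.List.foldl_append_singleton_eq_map
              (fun p : Int × List Int =>
                ((PySem.List.pyGet? p.2 0).getD 0, 1, (PySem.List.pyGet? p.2 (-1)).getD 0,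
                   pvEndDayA ((PySem.List.pyGet? p.2 (-1)).getD 0),
                   "Cali_RunPeriod_" ++ PySem.Int.toStr p.1))]
        rw [← hA, pvEnumerateMap pvKeyf, List.map_map]
        rfl

-- ===== VERDICT (by name: the statement is the Claim_ definition above) =====
theorem month_set_to_runperiods_py_spec : Claim_equal_month_set_to_runperiods_py := by
  intro months _ _
  unfold Spec_month_set_to_runperiods_py
  exact pvPorts_eq months
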